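-- pv_equiv track=rewrite | github.com/barmaleii77-hub/pneumo2 | pneumo2_R31CN_HF8_repo_root/pneumo_solver_ui/desktop_spec_shell/workspace_runtime.py | _ring_turns_text
-- ===== SOURCE A (Python) =====
-- from typing import Any
--
-- def _ring_turns_text(rows: list[dict[str, Any]]) -> str:
--     labels = {"STRAIGHT": "прямо", "LEFT": "лево", "RIGHT": "право"}
--     turns: dict[str, int] = {}
--     for row in rows:
--         turn = str(row.get("turn_direction") or "STRAIGHT").strip().upper()
--         label = labels.get(turn, turn.lower())
--         turns[label] = turns.get(label, 0) + 1
--     if not turns: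
--         return "манёвры пока не рассчитаны"
--     return ", ".join(f"{label}: {count}" for label, count in sorted(turns.items()))
-- ===== SOURCE B (Python) =====
-- from typing import Any
--
-- def _label(row: dict[str, Any]) -> str:
--     labels = {"STRAIGHT": "прямо", "LEFT": "лево", "RIGHT": "право"}
--     turn = str(row.get("turn_direction") or "STRAIGHT").strip().upper()
--     return labels.get(turn, turn.lower())
--
-- def _ring_turns_text(rows: list[dict[str, Any]]) -> str:
--     found = sorted(_label(row) for row in rows)
--     if not found:
--         return "манёвры пока не рассчитаны"
--     parts = []
--     while found:
--         x, rest = found[0], found[1:]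
--         run = 0
--         while run < len(rest) and rest[run] == x:
--             run += 1
--         parts.append((x, run + 1))
--         found = rest[run:]
--     return ", ".join(f"{label}: {count}" for label, count in parts)
-- ===== Notes on version B (the rewrite author's own statement) =====
-- stated objective: alternative
-- what changed: A counts labels in an insertion-ordered dict and then sorts the (label, count) items; B builds the flat label list, sorts it once, and emits each group by a run-length scan of the sorted list, which is already in output order.
import Mathlib
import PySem

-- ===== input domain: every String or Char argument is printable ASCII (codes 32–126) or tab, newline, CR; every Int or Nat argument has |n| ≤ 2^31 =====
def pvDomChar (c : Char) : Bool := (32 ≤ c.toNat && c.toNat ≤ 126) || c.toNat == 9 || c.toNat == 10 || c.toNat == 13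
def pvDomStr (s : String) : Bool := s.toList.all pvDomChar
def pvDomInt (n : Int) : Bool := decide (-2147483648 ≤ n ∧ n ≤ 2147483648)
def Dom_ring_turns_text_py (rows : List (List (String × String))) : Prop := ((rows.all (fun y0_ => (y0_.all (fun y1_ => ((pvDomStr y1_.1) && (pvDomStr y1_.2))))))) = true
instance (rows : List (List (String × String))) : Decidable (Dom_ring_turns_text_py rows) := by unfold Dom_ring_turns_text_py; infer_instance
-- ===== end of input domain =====

-- B replaces A's insertion-ordered count dict + final sort of the (label, count) items
-- by a sort of the per-row label list followed by a run-length scan (objective: alternative; not faster).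

-- shared per-row label: str(row.get("turn_direction") or "STRAIGHT").strip().upper(), then labels.get(turn, turn.lower())
-- (this expression appears verbatim in both Pythons)
def pvLabel (row : List (String × String)) : String :=
  let raw : String :=
    match (PySem.Dict.mk row).get? "turn_direction" with
    | some s => if s = "" then "STRAIGHT" else s
    | none => "STRAIGHT"
  let turn := PySem.Str.upper (PySem.Str.strip raw)
  ((PySem.Dict.mk [("STRAIGHT", "прямо"), ("LEFT", "лево"), ("RIGHT", "право")]).get? turn).getD
    (PySem.Str.lower turn)

-- ===== PORT A =====
def ring_turns_text_py (rows : List (List (String × String))) : String :=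
  let turns : PySem.Dict String Int :=
    rows.foldl (fun d row =>
      let label := pvLabel row
      d.insert label (d.getD label 0 + 1)) PySem.Dict.empty
  if turns.size = 0 then "манёвры пока не рассчитаны"
  else
    PySem.Str.join ", "
      ((PySem.List.sorted2 turns.items (fun p => p.1) (fun p => p.2)).map
        (fun p => p.1 ++ ": " ++ PySem.Int.toStr p.2))

-- ===== PORT B =====
-- while-loop run-length scan of the sorted label list: x = found[0], rest = found[1:],
-- count the run of x at the front of rest, emit (x, run+1), continue with rest[run:]
def pvRuns : List String → List (String × Int)
  | [] => []
  | x :: rest =>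
      let run := (rest.takeWhile (· == x)).length
      (x, (run : Int) + 1) :: pvRuns (rest.drop run)
termination_by l => l.length
decreasing_by simp

def ring_turns_text_py_alt (rows : List (List (String × String))) : String :=
  let found := PySem.List.sorted (rows.map pvLabel) (fun x => x)
  if found = [] then "манёвры пока не рассчитаны"
  else
    PySem.Str.join ", "
      ((pvRuns found).map (fun p => p.1 ++ ": " ++ PySem.Int.toStr p.2))

-- ===== PRECONDITION & SPEC =====
def Spec_ring_turns_text_py (rows : List (List (String × String))) (out : String) : Prop := out = ring_turns_text_py_alt rows
instance (rows : List (List (String × String))) (out : String) : Decidable (Spec_ring_turns_text_py rows out) := by unfold Spec_ring_turns_text_py; infer_instance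

-- ===== CLAIM (what is proved, stated in full; the proofs are below) =====
def Claim_equal_ring_turns_text_py : Prop := ∀ (rows : List (List (String × String))), Dom_ring_turns_text_py rows → Spec_ring_turns_text_py rows (ring_turns_text_py rows)

-- ===== LEMMAS AND PROOFS =====

-- one insertBy step only looks at comparisons of the inserted element against the accumulator
lemma pv_insertBy_congr {α : Type} (b1 b2 : α → α → Bool) (x : α) (ys : List α)
    (h : ∀ y ∈ ys, b1 x y = b2 x y) :
    PySem.List.insertBy b1 x ys = PySem.List.insertBy b2 x ys := by
  induction ys with
  | nil => rfl
  | cons y ys ih =>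
      simp only [PySem.List.insertBy]
      rw [h y (by simp)]
      by_cases hb : b2 x y = true
      · simp [hb]
      · simp [hb, ih (fun z hz => h z (by simp [hz]))]

-- when all first keys are distinct, the lexicographic insertion sort never consults the second key
lemma pv_foldl_insertBy_congr {α κ₁ κ₂ : Type} [LinearOrder κ₁] [LinearOrder κ₂]
    (k1 : α → κ₁) (k2 : α → κ₂) (xs acc : List α)
    (hacc : ∀ a ∈ acc, ∀ b ∈ xs, k1 a ≠ k1 b) (hnd : (xs.map k1).Nodup) :
    xs.foldl (fun acc x => PySem.List.insertBy
        (fun a b => decide (k1 a < k1 b) || (!decide (k1 b < k1 a) && decide (k2 a < k2 b))) x acc) acc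
      = xs.foldl (fun acc x => PySem.List.insertBy (fun a b => decide (k1 a < k1 b)) x acc) acc := by
  induction xs generalizing acc with
  | nil => rfl
  | cons x xs ih =>
      simp only [List.foldl_cons]
      rw [pv_insertBy_congr
        (fun a b => decide (k1 a < k1 b) || (!decide (k1 b < k1 a) && decide (k2 a < k2 b)))
        (fun a b => decide (k1 a < k1 b)) x acc (fun y hy => by
          have hne : k1 y ≠ k1 x := hacc y hy x (by simp)
          rcases lt_or_gt_of_ne hne.symm with hlt | hlt
          · simp [hlt, not_lt.mpr hlt.le]
          · simp [not_lt.mpr hlt.le, hlt])]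
      apply ih
      · intro a ha b hb
        have hmem : a ∈ x :: acc :=
          (PySem.List.insertBy_perm (fun a b => decide (k1 a < k1 b)) x acc).mem_iff.mp ha
        rcases List.mem_cons.mp hmem with rfl | ha'
        · simp at hnd
          exact fun hk => hnd.1 b hb hk.symm
        · exact hacc a ha' b (by simp [hb])
      · simp at hnd ⊢
        exact hnd.2

-- sorted2 with distinct first keys is sorted by the first key alone
lemma pv_sorted2_eq_sorted {α κ₁ κ₂ : Type} [LinearOrder κ₁] [LinearOrder κ₂]
    (xs : List α) (k1 : α → κ₁) (k2 : α → κ₂) (h : (xs.map k1).Nodup) :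
    PySem.List.sorted2 xs k1 k2 = PySem.List.sorted xs k1 := by
  rw [PySem.List.sorted_eq_foldl_insertBy]
  exact pv_foldl_insertBy_congr k1 k2 xs [] (by simp) h

-- set(xs) is empty iff xs is
lemma pv_ofList_eq_nil {α : Type} [BEq α] [LawfulBEq α] (xs : List α) :
    PySem.Set.ofList xs = [] ↔ xs = [] := by
  constructor
  · intro h
    cases xs with
    | nil => rfl
    | cons x xs =>
        have : x ∈ PySem.Set.ofList (x :: xs) := (PySem.Set.mem_ofList _ _).mpr (by simp)
        simp [h] at this
  · rintro rfl; rfl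

-- the run-length scan of a sorted list yields each distinct value with its count, in sorted order
lemma pv_runs_sorted (s : List String) (hs : s.Pairwise (· ≤ ·)) :
    pvRuns s = (PySem.List.sorted (PySem.Set.ofList s) (fun x => x)).map
      (fun k => (k, (s.count k : Int))) := by
  induction s using pvRuns.induct with
  | case1 => simp [pvRuns, PySem.List.sorted_eq_nil_iff]
  | case2 x rest run ih =>
      set t := rest.takeWhile (· == x) with htdef
      set d := rest.dropWhile (· == x) with hddef
      have hrest : t ++ d = rest := List.takeWhile_append_dropWhile
      have hdrop2 : rest.drop t.length = d := by
        rw [← hrest]; exact List.drop_left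
      have hdrop : rest.drop run = d := hdrop2
      have ht : ∀ y ∈ t, y = x := fun y hy => by
        have := List.mem_takeWhile_imp hy
        simpa using this
      have hd_sub : d.Sublist rest := List.dropWhile_sublist _
      have hrest_pw : rest.Pairwise (· ≤ ·) := (List.pairwise_cons.mp hs).2
      have hx_le : ∀ y ∈ rest, x ≤ y := (List.pairwise_cons.mp hs).1
      have hd_pw : d.Pairwise (· ≤ ·) := hrest_pw.sublist hd_sub
      have hlt : ∀ y ∈ d, x < y := by
        intro y hy
        cases hdd : d with
        | nil => simp [hdd] at hy
        | cons z d' =>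
            have hzne : (z == x) = false := by
              have := List.head_dropWhile_not (· == x) (l := rest) (by rw [← hddef, hdd]; simp)
              simpa [← hddef, hdd] using this
            have hzx : z ≠ x := by simpa using hzne
            have hxz : x < z :=
              lt_of_le_of_ne (hx_le z (hd_sub.mem (by simp [hdd]))) (Ne.symm hzx)
            rcases List.mem_cons.mp (by rw [← hdd]; exact hy) with rfl | hy'
            · exact hxz
            · exact lt_of_lt_of_le hxz ((List.pairwise_cons.mp (by rw [hdd] at hd_pw; exact hd_pw)).1 y hy')
      have hxnd : x ∉ d := fun h => lt_irrefl x (hlt x h)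
      have hcount_x : (x :: rest).count x = t.length + 1 := by
        rw [← hrest]
        have h1 : t.count x = t.length := List.count_eq_length.mpr (fun b hb => by
          rw [ht b hb])
        have h2 : d.count x = 0 := List.count_eq_zero.mpr hxnd
        simp [List.count_append, h1, h2]
      have hcount_ne : ∀ k, k ≠ x → (x :: rest).count k = d.count k := by
        intro k hk
        rw [← hrest]
        have h1 : t.count k = 0 := List.count_eq_zero.mpr (fun hkk => hk (ht k hkk))
        simp [List.count_append, h1, Ne.symm hk]
      have hmem_s : ∀ a, a ∈ (x :: rest) ↔ (a = x ∨ a ∈ d) := by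
        intro a
        rw [← hrest]
        constructor
        · intro h
          rcases List.mem_cons.mp h with rfl | h'
          · exact Or.inl rfl
          · rcases List.mem_append.mp h' with h'' | h''
            · exact Or.inl (ht a h'')
            · exact Or.inr h''
        · rintro (rfl | h')
          · simp
          · simp [h']
      have hnds : (x :: PySem.List.sorted (PySem.Set.ofList d) (fun x => x)).Nodup := by
        rw [List.nodup_cons]
        constructor
        · intro hmem
          exact hxnd ((PySem.Set.mem_ofList _ _).mp
            ((PySem.List.sorted_perm (PySem.Set.ofList d) (fun x => x) false).mem_iff.mp hmem))
        · exact ((PySem.List.sorted_perm (PySem.Set.ofList d) (fun x => x) false).nodup_iff).mpr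
            (PySem.Set.nodup_ofList d)
      have hperm : (x :: PySem.List.sorted (PySem.Set.ofList d) (fun x => x)).Perm
          (PySem.Set.ofList (x :: rest)) := by
        rw [List.perm_ext_iff_of_nodup hnds (PySem.Set.nodup_ofList _)]
        intro a
        rw [PySem.Set.mem_ofList, hmem_s a, List.mem_cons,
          (PySem.List.sorted_perm (PySem.Set.ofList d) (fun x => x) false).mem_iff,
          PySem.Set.mem_ofList]
      have hpw : (x :: PySem.List.sorted (PySem.Set.ofList d) (fun x => x)).Pairwise (· ≤ ·) := by
        rw [List.pairwise_cons]
        refine ⟨fun y hy => ?_, PySem.List.sorted_pairwise _ _⟩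
        exact (hlt y ((PySem.Set.mem_ofList _ _).mp
          ((PySem.List.sorted_perm (PySem.Set.ofList d) (fun x => x) false).mem_iff.mp hy))).le
      have hset : PySem.List.sorted (PySem.Set.ofList (x :: rest)) (fun x => x)
          = x :: PySem.List.sorted (PySem.Set.ofList d) (fun x => x) :=
        PySem.List.sorted_id_eq_of_perm_of_pairwise _ _ hperm hpw
      rw [pvRuns, hset]
      simp only [List.map_cons]
      rw [← htdef]
      congr 1
      · rw [hcount_x]
        push_cast
        rfl
      · rw [hdrop2]
        rw [hdrop] at ih
        rw [ih hd_pw]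
        apply List.map_congr_left
        intro k hk
        have hkd : k ∈ d := (PySem.Set.mem_ofList _ _).mp
          ((PySem.List.sorted_perm (PySem.Set.ofList d) (fun x => x) false).mem_iff.mp hk)
        have : k ≠ x := fun h => hxnd (h ▸ hkd)
        rw [hcount_ne k this]

-- main equivalence, stated without the (unused) domain hypothesis
lemma pv_main (rows : List (List (String × String))) :
    ring_turns_text_py rows = ring_turns_text_py_alt rows := by
  simp only [ring_turns_text_py, ring_turns_text_py_alt]
  have hrw : (rows.foldl (fun d row => d.insert (pvLabel row) (d.getD (pvLabel row) 0 + 1))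
        (PySem.Dict.empty : PySem.Dict String Int))
      = PySem.Dict.counter (rows.map pvLabel) := by
    rw [← PySem.Dict.foldl_insert_getD_add_one_eq_counter, List.foldl_map]
  rw [hrw]
  by_cases hL : rows.map pvLabel = []
  · rw [hL]
    simp [PySem.List.sorted_eq_nil_iff, PySem.Dict.size, PySem.Dict.items_counter]
  · have hsize : (PySem.Dict.counter (rows.map pvLabel)).size ≠ 0 := by
      simp only [PySem.Dict.size, PySem.Dict.items_counter, List.length_map]
      simp [List.length_eq_zero_iff, pv_ofList_eq_nil, hL]
    have hsorted : PySem.List.sorted (rows.map pvLabel) (fun x => x) ≠ [] := by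
      simp [PySem.List.sorted_eq_nil_iff, hL]
    rw [if_neg hsize, if_neg hsorted]
    congr 1
    set L := rows.map pvLabel with hLdef
    have hitems : (PySem.Dict.counter L).items
        = (PySem.Set.ofList L).map (fun k => (k, (L.count k : Int))) :=
      PySem.Dict.items_counter L
    have hnodup : ((((PySem.Set.ofList L).map (fun k => (k, (L.count k : Int)))).map
        (fun p : String × Int => p.1)).Nodup) := by
      rw [List.map_map]
      rw [show ((fun p : String × Int => p.1) ∘ fun k => (k, (L.count k : Int))) = id from rfl]
      rw [List.map_id]
      exact PySem.Set.nodup_ofList L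
    have hA : PySem.List.sorted2 (PySem.Dict.counter L).items (fun p => p.1) (fun p => p.2)
        = (PySem.List.sorted (PySem.Set.ofList L) (fun x => x)).map
            (fun k => (k, (L.count k : Int))) := by
      rw [hitems, pv_sorted2_eq_sorted _ _ _ hnodup]
      apply PySem.List.sorted_eq_of_perm_of_pairwise_lt
      · exact (PySem.List.sorted_perm _ _ false).map _
      · rw [List.pairwise_map]
        exact PySem.List.sorted_ofList_pairwise_lt L
    have hpermL : (PySem.List.sorted L (fun x => x)).Perm L := PySem.List.sorted_perm _ _ false
    have hofperm : (PySem.Set.ofList (PySem.List.sorted L (fun x => x))).Perm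
        (PySem.Set.ofList L) := by
      rw [List.perm_ext_iff_of_nodup (PySem.Set.nodup_ofList _) (PySem.Set.nodup_ofList _)]
      intro a
      rw [PySem.Set.mem_ofList, PySem.Set.mem_ofList, hpermL.mem_iff]
    have hB : pvRuns (PySem.List.sorted L (fun x => x))
        = (PySem.List.sorted (PySem.Set.ofList L) (fun x => x)).map
            (fun k => (k, (L.count k : Int))) := by
      rw [pv_runs_sorted _ (PySem.List.sorted_pairwise L (fun x => x))]
      rw [PySem.List.sorted_eq_sorted_of_perm _ _ (fun x => x) (fun a b h => h) hofperm]
      apply List.map_congr_left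
      intro k _
      rw [hpermL.count_eq]
    rw [hA, hB]

-- ===== VERDICT (by name: the statement is the Claim_ definition above) =====
theorem ring_turns_text_py_spec : Claim_equal_ring_turns_text_py := by
  intro rows _
  exact pv_main rows
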